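-- pv_equiv track=rewrite | github.com/terrylimxc/Advent-of-Code | 2023/day03/day03.py | find_all_nums_reversed
-- ===== SOURCE A (Python) =====
-- def find_all_nums_reversed(grid):
--     main = {}
--     for i in range(len(grid)):
--         temp, flag = "", False
--         pos = []
--         for j in range(len(grid[i])):
--             if flag and (not grid[i][j].isdigit()):
--                 for item in pos:
--                     main[item] = temp
--                 temp, flag = "", False
--                 pos = []
--             elif grid[i][j].isdigit():
--                 temp += grid[i][j]
--                 pos.append((i,j))
--                 flag = True
--
--         if flag:
--             for item in pos:
--                 main[item] = temp
--
--     return main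
-- ===== SOURCE B (Python) =====
-- def find_all_nums_reversed(grid):
--     main = {}
--     for i, row in enumerate(grid):
--         j, n = 0, len(row)
--         while j < n:
--             if not row[j].isdigit():
--                 j += 1
--                 continue
--             k = j
--             while k < n and row[k].isdigit():
--                 k += 1
--             num = row[j:k]
--             for p in range(j, k):
--                 main[(i, p)] = num
--             j = k
--     return main
-- ===== Notes on version B (the rewrite author's own statement) =====
-- stated objective: simpler
-- what changed: Replaces A's per-character temp/flag/pos state machine (with its end-of-row flush) by a per-row scan over maximal digit runs: find each run's end, slice the number out, and assign it to the run's index range.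
import Mathlib
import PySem

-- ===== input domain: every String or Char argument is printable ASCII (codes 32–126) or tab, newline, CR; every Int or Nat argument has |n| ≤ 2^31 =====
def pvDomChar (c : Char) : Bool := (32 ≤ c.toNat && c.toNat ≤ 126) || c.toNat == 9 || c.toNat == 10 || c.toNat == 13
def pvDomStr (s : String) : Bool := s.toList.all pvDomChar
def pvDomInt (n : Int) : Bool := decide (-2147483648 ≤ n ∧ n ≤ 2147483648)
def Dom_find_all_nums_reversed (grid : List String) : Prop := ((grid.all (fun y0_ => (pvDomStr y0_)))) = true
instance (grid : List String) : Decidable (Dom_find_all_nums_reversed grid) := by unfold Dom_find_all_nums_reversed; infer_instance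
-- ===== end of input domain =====

-- B replaces A's per-character temp/flag/pos state machine (with its end-of-row flush) by a
-- per-row scan over maximal digit runs (objective: simpler). Same return value; no mutation.

-- ===== PORT A =====
def pvFlushA (d : PySem.Dict (Int × Int) String) (pos : List (Int × Int)) (temp : List Char) :
    PySem.Dict (Int × Int) String :=
  pos.foldl (fun d it => d.insert it (String.mk temp)) d
def pvRowA (i : Int) : Int → List Char →
    (PySem.Dict (Int × Int) String × List Char × Bool × List (Int × Int)) →
    PySem.Dict (Int × Int) String × List Char × Bool × List (Int × Int)
  | _, [], st => st
  | j, c :: cs, (d, temp, flag, pos) =>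
    if flag && !(PySem.Chars.isdigit c) then
      pvRowA i (j + 1) cs (pvFlushA d pos temp, [], false, [])
    else if PySem.Chars.isdigit c then
      pvRowA i (j + 1) cs (d, temp ++ [c], true, pos ++ [(i, j)])
    else
      pvRowA i (j + 1) cs (d, temp, flag, pos)

-- the end-of-row "if flag: flush" step
def pvFinishA (st : PySem.Dict (Int × Int) String × List Char × Bool × List (Int × Int)) :
    PySem.Dict (Int × Int) String :=
  if st.2.2.1 then pvFlushA st.1 st.2.2.2 st.2.1 else st.1


def find_all_nums_reversed (grid : List String) : List (Int × Int × String) :=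
  let main := (PySem.List.pyRange 0 (PySem.List.len grid) 1).foldl
    (fun d i => pvFinishA (pvRowA i 0 (PySem.List.pyGetD grid i "").toList (d, [], false, [])))
    PySem.Dict.empty
  main.items.map (fun p => (p.1.1, p.1.2, p.2))

-- ===== PORT B =====
-- one row: skip non-digits; at a digit, the "while k < n and row[k].isdigit()" scan yields the
-- maximal digit run (takeWhile/dropWhile), num = row[j:k], then num is assigned on range(j, k)
def pvRowB (i : Int) : Int → List Char → PySem.Dict (Int × Int) String →
    PySem.Dict (Int × Int) String
  | _, [], d => d
  | j, c :: cs, d =>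
    if h : PySem.Chars.isdigit c then
      let run := (c :: cs).takeWhile PySem.Chars.isdigit
      let k := j + run.length
      let num := String.mk run
      pvRowB i k ((c :: cs).dropWhile PySem.Chars.isdigit)
        ((PySem.List.pyRange j k 1).foldl (fun d p => d.insert (i, p) num) d)
    else
      pvRowB i (j + 1) cs d
termination_by _ cs _ => cs.length
decreasing_by
  · simp [h]
    exact List.length_dropWhile_le _ _
  · simp


def find_all_nums_reversed_alt (grid : List String) : List (Int × Int × String) :=
  let main := (PySem.List.enumerate grid 0).foldl
    (fun d p => pvRowB p.1 0 p.2.toList d) PySem.Dict.empty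
  main.items.map (fun p => (p.1.1, p.1.2, p.2))

-- ===== PRECONDITION & SPEC =====
def Spec_find_all_nums_reversed (grid : List String) (out : List (Int × Int × String)) : Prop := out = find_all_nums_reversed_alt grid
instance (grid : List String) (out : List (Int × Int × String)) : Decidable (Spec_find_all_nums_reversed grid out) := by unfold Spec_find_all_nums_reversed; infer_instance

-- ===== CLAIM (what is proved, stated in full; the proofs are below) =====
def Claim_equal_find_all_nums_reversed : Prop := ∀ (grid : List String), Dom_find_all_nums_reversed grid → Spec_find_all_nums_reversed grid (find_all_nums_reversed grid)

-- ===== LEMMAS AND PROOFS =====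
def pvPosL (i : Int) : Int → List Char → List (Int × Int)
  | _, [] => []
  | j, _ :: r => (i, j) :: pvPosL i (j + 1) r

theorem pvPosL_eq (i : Int) : ∀ (run : List Char) (j : Int),
    pvPosL i j run = (PySem.List.pyRange j (j + run.length) 1).map (fun p => (i, p)) := by
  intro run
  induction run with
  | nil => intro j; simp [pvPosL, PySem.List.pyRange_one_eq_nil]
  | cons c r ih =>
    intro j
    have hlt : j < j + ((c :: r).length : Int) := by simp only [List.length_cons]; push_cast; omega
    rw [PySem.List.pyRange_one_cons hlt]
    simp only [pvPosL, List.map_cons, List.cons.injEq, true_and]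
    rw [ih (j + 1)]
    congr 2
    simp only [List.length_cons]; push_cast; ring

theorem pvRowA_run (i : Int) (run : List Char) (h : ∀ c ∈ run, PySem.Chars.isdigit c = true) :
    ∀ (rest : List Char) (j : Int) (d : PySem.Dict (Int × Int) String)
      (temp : List Char) (pos : List (Int × Int)),
    pvRowA i j (run ++ rest) (d, temp, true, pos) =
      pvRowA i (j + run.length) rest (d, temp ++ run, true, pos ++ pvPosL i j run) := by
  induction run with
  | nil => intro rest j d temp pos; simp [pvPosL]
  | cons c run' ih =>
    intro rest j d temp pos
    have hc : PySem.Chars.isdigit c = true := h c (by simp)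
    rw [List.cons_append]
    show pvRowA i j (c :: (run' ++ rest)) (d, temp, true, pos) = _
    rw [pvRowA]
    simp only [hc, Bool.not_true, Bool.and_false]
    have h' : ∀ x ∈ run', PySem.Chars.isdigit x = true := fun x hx => h x (List.mem_cons_of_mem _ hx)
    rw [ih h']
    have harith : j + 1 + (run'.length : Int) = j + ((c :: run').length : Int) := by
      simp only [List.length_cons]; push_cast; ring
    rw [harith]
    simp [pvPosL]

-- B's range-insert loop is A's pos-list flush
theorem pvFlush_eq (i : Int) (run : List Char) (d : PySem.Dict (Int × Int) String) :
    ∀ (j : Int), pvFlushA d (pvPosL i j run) run =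
      (PySem.List.pyRange j (j + run.length) 1).foldl (fun d p => d.insert (i, p) (String.mk run)) d := by
  intro j
  rw [pvPosL_eq]
  unfold pvFlushA
  rw [List.foldl_map]

theorem pvRow_eq (i : Int) : ∀ (n : Nat) (cs : List Char), cs.length ≤ n →
    ∀ (j : Int) (d : PySem.Dict (Int × Int) String),
    pvFinishA (pvRowA i j cs (d, [], false, [])) = pvRowB i j cs d := by
  intro n
  induction n with
  | zero =>
    intro cs hcs j d
    have : cs = [] := List.length_eq_zero_iff.mp (Nat.le_zero.mp hcs)
    subst this
    simp [pvRowA, pvRowB, pvFinishA]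
  | succ n ih =>
    intro cs hcs j d
    match cs with
    | [] => simp [pvRowA, pvRowB, pvFinishA]
    | c :: cs' =>
      by_cases hc : PySem.Chars.isdigit c = true
      · -- digit head: the whole maximal run is consumed on both sides
        have htake : (c :: cs').takeWhile PySem.Chars.isdigit = c :: cs'.takeWhile PySem.Chars.isdigit :=
          List.takeWhile_cons_of_pos hc
        have hdrop : (c :: cs').dropWhile PySem.Chars.isdigit = cs'.dropWhile PySem.Chars.isdigit :=
          List.dropWhile_cons_of_pos hc
        have hcs' : cs' = cs'.takeWhile PySem.Chars.isdigit ++ cs'.dropWhile PySem.Chars.isdigit :=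
          List.takeWhile_append_dropWhile.symm
        have h'' : ∀ x ∈ cs'.takeWhile PySem.Chars.isdigit, PySem.Chars.isdigit x = true :=
          fun x hx => List.mem_takeWhile_imp hx
        have hA : pvRowA i j (c :: cs') (d, [], false, []) =
            pvRowA i (j + ((c :: cs').takeWhile PySem.Chars.isdigit).length)
              ((c :: cs').dropWhile PySem.Chars.isdigit)
              (d, (c :: cs').takeWhile PySem.Chars.isdigit, true,
               pvPosL i j ((c :: cs').takeWhile PySem.Chars.isdigit)) := by
          rw [pvRowA]
          simp only [Bool.false_and, Bool.not_true, hc, Bool.false_eq_true, if_false, if_true,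
            List.nil_append]
          conv_lhs => rw [hcs']
          rw [pvRowA_run i _ h'']
          rw [htake, hdrop, pvPosL]
          have harith : j + 1 + ((cs'.takeWhile PySem.Chars.isdigit).length : Int) =
              j + ((c :: cs'.takeWhile PySem.Chars.isdigit).length : Int) := by
            simp only [List.length_cons]; push_cast; ring
          rw [harith]
          simp
        have hB : pvRowB i j (c :: cs') d =
            pvRowB i (j + ((c :: cs').takeWhile PySem.Chars.isdigit).length)
              ((c :: cs').dropWhile PySem.Chars.isdigit)
              ((PySem.List.pyRange j (j + ((c :: cs').takeWhile PySem.Chars.isdigit).length) 1).foldl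
                (fun d p => d.insert (i, p) (String.mk ((c :: cs').takeWhile PySem.Chars.isdigit))) d) := by
          rw [pvRowB]
          simp only [hc, reduceDIte]
        rw [hB]
        cases hrest : (c :: cs').dropWhile PySem.Chars.isdigit with
        | nil =>
          rw [hrest] at hA
          rw [hA]
          simp only [pvFinishA, pvRowA, pvRowB, if_true]
          rw [pvFlush_eq]
        | cons c' rest' =>
          have hc' : PySem.Chars.isdigit c' = false := by
            have := List.head?_dropWhile_not PySem.Chars.isdigit (c :: cs')
            rw [hrest] at this; simpa using this
          have hAstep : pvRowA i (j + ((c :: cs').takeWhile PySem.Chars.isdigit).length)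
              (c' :: rest')
              (d, (c :: cs').takeWhile PySem.Chars.isdigit, true,
               pvPosL i j ((c :: cs').takeWhile PySem.Chars.isdigit)) =
              pvRowA i (j + ((c :: cs').takeWhile PySem.Chars.isdigit).length + 1) rest'
                (pvFlushA d (pvPosL i j ((c :: cs').takeWhile PySem.Chars.isdigit))
                  ((c :: cs').takeWhile PySem.Chars.isdigit), [], false, []) := by
            rw [pvRowA]
            simp [hc']
          have hBstep : pvRowB i (j + ((c :: cs').takeWhile PySem.Chars.isdigit).length)
              (c' :: rest')
              ((PySem.List.pyRange j (j + ((c :: cs').takeWhile PySem.Chars.isdigit).length) 1).foldl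
                (fun d p => d.insert (i, p) (String.mk ((c :: cs').takeWhile PySem.Chars.isdigit))) d) =
              pvRowB i (j + ((c :: cs').takeWhile PySem.Chars.isdigit).length + 1) rest'
                ((PySem.List.pyRange j (j + ((c :: cs').takeWhile PySem.Chars.isdigit).length) 1).foldl
                  (fun d p => d.insert (i, p) (String.mk ((c :: cs').takeWhile PySem.Chars.isdigit))) d) := by
            rw [pvRowB]
            simp [hc']
          have hlen : rest'.length ≤ n := by
            have h1 : ((c :: cs').dropWhile PySem.Chars.isdigit).length ≤ cs'.length := by
              rw [hdrop]; exact List.length_dropWhile_le _ _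
            rw [hrest] at h1
            simp only [List.length_cons] at h1 hcs
            omega
          rw [hrest] at hA
          rw [hA, hAstep, hBstep, ← pvFlush_eq]
          exact ih rest' hlen _ _
      · have hA : pvRowA i j (c :: cs') (d, [], false, []) = pvRowA i (j + 1) cs' (d, [], false, []) := by
          rw [pvRowA]; simp [hc]
        have hB : pvRowB i j (c :: cs') d = pvRowB i (j + 1) cs' d := by
          rw [pvRowB]; simp [hc]
        rw [hA, hB]
        exact ih cs' (by simp at hcs; omega) (j + 1) d

-- ===== VERDICT (by name: the statement is the Claim_ definition above) =====
theorem find_all_nums_reversed_spec : Claim_equal_find_all_nums_reversed := by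
  intro grid _
  unfold Spec_find_all_nums_reversed find_all_nums_reversed find_all_nums_reversed_alt
  rw [PySem.List.enumerate_eq_map_pyRange grid "", List.foldl_map]
  have hfun : (fun (d : PySem.Dict (Int × Int) String) (i : Int) =>
        pvFinishA (pvRowA i 0 (PySem.List.pyGetD grid i "").toList (d, [], false, []))) =
      (fun (d : PySem.Dict (Int × Int) String) (i : Int) =>
        pvRowB (i, PySem.List.pyGetD grid i "").1 0 (i, PySem.List.pyGetD grid i "").2.toList d) := by
    funext d i
    exact pvRow_eq i (PySem.List.pyGetD grid i "").toList.length _ (le_refl _) 0 d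
  rw [hfun]
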